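-- pv_equiv track=rewrite | github.com/Miguelstella31/juego-stop | servidor.py | calcular_puntos_ronda
-- ===== SOURCE A (Python) =====
-- def calcular_puntos_ronda(jugadores):
--     """Return a dict of round scores for each player based on their
--     stored answers in ``jugadores``.
--
--     Answers that are empty or don't start with the current letter are
--     ignored. If an answer is unique for its category it is worth 100
--     points, otherwise 50.
--     """
--     # Gather counts of each answer per category
--     categoria_conteos = {}
--     for datos in jugadores.values():
--         for categoria, respuesta in datos.get("respuestas", {}).items():
--             if respuesta:
--                 categoria_conteos.setdefault(categoria, {})
--                 key = respuesta.strip().lower()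
--                 categoria_conteos[categoria][key] = categoria_conteos[categoria].get(key, 0) + 1
--
--     # Compute score for each player
--     puntajes = {}
--     for nombre, datos in jugadores.items():
--         puntaje = 0
--         for categoria, respuesta in datos.get("respuestas", {}).items():
--             if not respuesta:
--                 continue
--             key = respuesta.strip().lower()
--             if categoria_conteos.get(categoria, {}).get(key, 0) == 1:
--                 puntaje += 100
--             else:
--                 puntaje += 50
--         puntajes[nombre] = puntaje
--     return puntajes
-- ===== SOURCE B (Python) =====
-- def calcular_puntos_ronda(jugadores):
--     """Group answers into an index (categoria, key) -> list of player names,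
--     then scatter the points per group instead of re-scanning each player."""
--     index = {}
--     for nombre, datos in jugadores.items():
--         for categoria, respuesta in datos.get("respuestas", {}).items():
--             if respuesta:
--                 key = (categoria, respuesta.strip().lower())
--                 index.setdefault(key, []).append(nombre)
--     puntajes = {nombre: 0 for nombre in jugadores}
--     for nombres in index.values():
--         if len(nombres) == 1:
--             puntajes[nombres[0]] += 100
--         else:
--             for n in nombres:
--                 puntajes[n] += 50
--     return puntajes
-- ===== Notes on version B (the rewrite author's own statement) =====
-- stated objective: alternative
-- what changed: Instead of building nested per-category answer counts and then re-scanning every player's answers with count lookups, B builds one index (categoria, normalised answer) -> list of player names, zero-initialises all scores, and scatters 100 (singleton group) or 50 per name over the grouped index entries.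
import Mathlib
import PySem

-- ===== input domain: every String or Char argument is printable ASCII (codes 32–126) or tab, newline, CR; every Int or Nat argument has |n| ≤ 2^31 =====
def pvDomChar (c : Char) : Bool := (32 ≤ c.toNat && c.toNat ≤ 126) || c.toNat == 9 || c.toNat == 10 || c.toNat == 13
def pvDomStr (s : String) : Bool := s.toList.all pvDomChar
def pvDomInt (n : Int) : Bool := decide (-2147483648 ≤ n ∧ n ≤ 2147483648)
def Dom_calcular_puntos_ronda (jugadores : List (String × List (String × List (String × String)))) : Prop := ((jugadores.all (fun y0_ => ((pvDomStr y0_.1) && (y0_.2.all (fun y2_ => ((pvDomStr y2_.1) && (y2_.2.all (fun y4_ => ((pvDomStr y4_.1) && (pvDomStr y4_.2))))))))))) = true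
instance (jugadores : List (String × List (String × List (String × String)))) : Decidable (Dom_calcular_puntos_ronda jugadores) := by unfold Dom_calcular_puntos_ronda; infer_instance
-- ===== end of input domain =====

-- B replaces A's count-then-rescan with a grouped index (categoria, key) -> player names and
-- scatters 100/50 per group ("alternative" decomposition, same asymptotic cost, return value only).

-- shared helper: datos.get("respuestas", {})  (both Pythons perform this lookup)
def pvResp (datos : List (String × List (String × String))) : List (String × String) :=
  PySem.Dict.getD (PySem.Dict.ofList datos) "respuestas" []

-- ===== PORT A =====
def calcular_puntos_ronda (jugadores : List (String × List (String × List (String × String)))) : List (String × Int) :=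
  let categoria_conteos : PySem.Dict String (PySem.Dict String Int) :=
    jugadores.foldl (fun cc nd =>
      (pvResp nd.2).foldl (fun cc cr =>
        if cr.2 ≠ "" then
          -- categoria_conteos.setdefault(categoria, {}); key = respuesta.strip().lower();
          -- categoria_conteos[categoria][key] = categoria_conteos[categoria].get(key, 0) + 1
          let cc1 := cc.setdefault cr.1 PySem.Dict.empty
          let key := PySem.Str.lower (PySem.Str.strip cr.2)
          let inner := cc1.getD cr.1 PySem.Dict.empty
          cc1.insert cr.1 (inner.insert key (inner.getD key 0 + 1))
        else cc) cc) PySem.Dict.empty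
  let puntajes : PySem.Dict String Int :=
    jugadores.foldl (fun punt nd =>
      let p := (pvResp nd.2).foldl (fun p cr =>
        if cr.2 = "" then p
        else
          let key := PySem.Str.lower (PySem.Str.strip cr.2)
          if (categoria_conteos.getD cr.1 PySem.Dict.empty).getD key 0 = 1 then p + 100 else p + 50) 0
      punt.insert nd.1 p) PySem.Dict.empty
  puntajes.items

-- ===== PORT B =====
def calcular_puntos_ronda_alt (jugadores : List (String × List (String × List (String × String)))) : List (String × Int) :=
  let index : PySem.Dict (String × String) (List String) :=
    jugadores.foldl (fun idx nd =>
      (pvResp nd.2).foldl (fun idx cr =>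
        if cr.2 ≠ "" then
          -- index.setdefault((categoria, key), []).append(nombre)
          idx.modify (cr.1, PySem.Str.lower (PySem.Str.strip cr.2)) [] (· ++ [nd.1])
        else idx) idx) PySem.Dict.empty
  let puntajes0 : PySem.Dict String Int :=
    jugadores.foldl (fun d nd => d.insert nd.1 0) PySem.Dict.empty
  let fin := index.values.foldl (fun d nombres =>
      if nombres.length = 1 then
        -- nombres[0]: exact here, a group is never empty; puntajes[n] += ...: exact here,
        -- every name in the index is a key of puntajes (so modify never inserts)
        d.modify (nombres.headD "") 0 (· + 100)
      else nombres.foldl (fun d n => d.modify n 0 (· + 50)) d) puntajes0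
  fin.items

-- ===== PRECONDITION & SPEC =====
-- Pre_ excludes association lists with duplicate player names — no Python dict represents such an
-- input (A is called on a dict, whose keys are unique), and on the raw lists A would keep only the
-- last duplicate's score while B sums the duplicates' scores.
def Pre_calcular_puntos_ronda (jugadores : List (String × List (String × List (String × String)))) : Prop :=
  (jugadores.map Prod.fst).Nodup
instance (jugadores : List (String × List (String × List (String × String)))) : Decidable (Pre_calcular_puntos_ronda jugadores) := by unfold Pre_calcular_puntos_ronda; infer_instance

def pvWitness_calcular_puntos_ronda : (List (String × List (String × List (String × String)))) :=
  [("ana", [("respuestas", [("animal", " Gato "), ("color", "rojo")])]),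
   ("luis", [("respuestas", [("animal", "gato"), ("color", "")])])]

def Spec_calcular_puntos_ronda (jugadores : List (String × List (String × List (String × String)))) (out : List (String × Int)) : Prop := out = calcular_puntos_ronda_alt jugadores
instance (jugadores : List (String × List (String × List (String × String)))) (out : List (String × Int)) : Decidable (Spec_calcular_puntos_ronda jugadores out) := by unfold Spec_calcular_puntos_ronda; infer_instance

-- ===== CLAIM (what is proved, stated in full; the proofs are below) =====
def Claim_equal_calcular_puntos_ronda : Prop := ∀ (jugadores : List (String × List (String × List (String × String)))), Dom_calcular_puntos_ronda jugadores → Pre_calcular_puntos_ronda jugadores → Spec_calcular_puntos_ronda jugadores (calcular_puntos_ronda jugadores)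

-- ===== LEMMAS AND PROOFS =====

-- the (categoria, normalised answer) key of one respuestas item
def keyOf (cr : String × String) : String × String := (cr.1, PySem.Str.lower (PySem.Str.strip cr.2))
-- the scored keys of one player's respuestas
def toKeys (rs : List (String × String)) : List (String × String) :=
  (rs.filter (fun cr => !(cr.2 == ""))).map keyOf
-- all (key, player-name) score events of the round, in traversal order
def trOf (jug : List (String × List (String × List (String × String)))) : List ((String × String) × String) :=
  jug.flatMap (fun nd => (toKeys (pvResp nd.2)).map (fun k => (k, nd.1)))
def allKeys (jug : List (String × List (String × List (String × String)))) : List (String × String) :=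
  (trOf jug).map Prod.fst
-- the worth of one answer key
def W (jug : List (String × List (String × List (String × String)))) (k : String × String) : Int :=
  if (allKeys jug).count k = 1 then 100 else 50
-- A's nested-counter step and lookup, over keys
def ncStep (cc : PySem.Dict String (PySem.Dict String Int)) (k : String × String) : PySem.Dict String (PySem.Dict String Int) :=
  let cc1 := cc.setdefault k.1 PySem.Dict.empty
  let inner := cc1.getD k.1 PySem.Dict.empty
  cc1.insert k.1 (inner.insert k.2 (inner.getD k.2 0 + 1))
def cLook (cc : PySem.Dict String (PySem.Dict String Int)) (k : String × String) : Int :=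
  (cc.getD k.1 PySem.Dict.empty).getD k.2 0
-- B's scatter bookkeeping
def sumFor (n : String) (ps : List (String × Int)) : Int :=
  ((ps.filter (fun p => p.1 == n)).map Prod.snd).sum
def scat (d : PySem.Dict String Int) (ps : List (String × Int)) : PySem.Dict String Int :=
  ps.foldl (fun d p => d.modify p.1 0 (· + p.2)) d
def wlen (nombres : List String) : Int := if nombres.length = 1 then 100 else 50
def pairsOf (nombres : List String) : List (String × Int) := nombres.map (fun n => (n, wlen nombres))

-- A: the counting double-loop is ncStep folded over allKeys
lemma A_count_inner (rs : List (String × String)) (cc : PySem.Dict String (PySem.Dict String Int)) :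
    rs.foldl (fun cc cr =>
      if cr.2 ≠ "" then
        (cc.setdefault cr.1 PySem.Dict.empty).insert cr.1
          (((cc.setdefault cr.1 PySem.Dict.empty).getD cr.1 PySem.Dict.empty).insert
            (PySem.Str.lower (PySem.Str.strip cr.2))
            (((cc.setdefault cr.1 PySem.Dict.empty).getD cr.1 PySem.Dict.empty).getD
              (PySem.Str.lower (PySem.Str.strip cr.2)) 0 + 1))
      else cc) cc
    = (toKeys rs).foldl ncStep cc := by
  induction rs generalizing cc with
  | nil => rfl
  | cons cr rs ih =>
    by_cases h : cr.2 = ""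
    · simp [toKeys, h]
      simp [toKeys] at ih
      exact ih cc
    · simp only [List.foldl_cons, if_pos (by simpa using h)]
      rw [ih]
      simp [toKeys, h, ncStep, keyOf]

lemma allKeys_eq (jug : List (String × List (String × List (String × String)))) :
    allKeys jug = jug.flatMap (fun nd => toKeys (pvResp nd.2)) := by
  simp [allKeys, trOf, List.map_flatMap, Function.comp_def]

lemma A_count (jug : List (String × List (String × List (String × String)))) (cc : PySem.Dict String (PySem.Dict String Int)) :
    jug.foldl (fun cc nd =>
      (pvResp nd.2).foldl (fun cc cr =>
        if cr.2 ≠ "" then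
          (cc.setdefault cr.1 PySem.Dict.empty).insert cr.1
            (((cc.setdefault cr.1 PySem.Dict.empty).getD cr.1 PySem.Dict.empty).insert
              (PySem.Str.lower (PySem.Str.strip cr.2))
              (((cc.setdefault cr.1 PySem.Dict.empty).getD cr.1 PySem.Dict.empty).getD
                (PySem.Str.lower (PySem.Str.strip cr.2)) 0 + 1))
        else cc) cc) cc
    = (allKeys jug).foldl ncStep cc := by
  induction jug generalizing cc with
  | nil => simp [allKeys, trOf]
  | cons nd jug ih =>
    rw [allKeys_eq] at ih ⊢
    simp only [List.flatMap_cons, List.foldl_cons, List.foldl_append]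
    rw [A_count_inner, ih]

lemma cLook_ncStep (cc : PySem.Dict String (PySem.Dict String Int)) (k0 k : String × String) :
    cLook (ncStep cc k0) k = cLook cc k + (if k = k0 then 1 else 0) := by
  have hsd : (cc.setdefault k0.1 PySem.Dict.empty).getD k0.1 PySem.Dict.empty
      = cc.getD k0.1 PySem.Dict.empty := PySem.Dict.getD_setdefault_self cc k0.1 _ _
  by_cases h1 : k.1 = k0.1
  · simp only [cLook, ncStep, hsd]
    rw [h1, PySem.Dict.getD_insert_self]
    by_cases h2 : k.2 = k0.2
    · rw [h2, PySem.Dict.getD_insert_self]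
      have : k = k0 := Prod.ext h1 h2
      simp [this]
    · rw [PySem.Dict.getD_insert_of_ne _ _ _ h2]
      have : ¬ k = k0 := fun he => h2 (by rw [he])
      simp [this]
  · have hsd2 : (cc.setdefault k0.1 PySem.Dict.empty).getD k.1 PySem.Dict.empty
        = cc.getD k.1 PySem.Dict.empty := by
      rw [PySem.Dict.getD_eq_get?_getD, PySem.Dict.get?_setdefault_of_ne _ _ h1,
        ← PySem.Dict.getD_eq_get?_getD]
    simp only [cLook, ncStep, hsd]
    rw [PySem.Dict.getD_insert_of_ne _ _ _ h1, hsd2]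
    have : ¬ k = k0 := fun he => h1 (by rw [he])
    simp [this]

lemma cLook_foldl (ks : List (String × String)) (cc : PySem.Dict String (PySem.Dict String Int)) (k : String × String) :
    cLook (ks.foldl ncStep cc) k = cLook cc k + ks.count k := by
  induction ks generalizing cc with
  | nil => simp
  | cons k0 ks ih =>
    rw [List.foldl_cons, ih, cLook_ncStep, List.count_cons]
    by_cases h : k = k0
    · subst h
      simp only [beq_self_eq_true, if_true]
      push_cast
      ring
    · have hb : (k0 == k) = false := beq_eq_false_iff_ne.2 (fun he => h he.symm)
      simp [h, hb]

lemma cLook_counts (jug : List (String × List (String × List (String × String)))) (k : String × String) :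
    cLook ((allKeys jug).foldl ncStep PySem.Dict.empty) k = (allKeys jug).count k := by
  rw [cLook_foldl]
  simp [cLook]

-- A: one player's scoring loop is a sum of worths
lemma A_score_inner (jug : List (String × List (String × List (String × String))))
    (rs : List (String × String)) (p : Int) :
    rs.foldl (fun p cr =>
      if cr.2 = "" then p
      else
        if (((allKeys jug).foldl ncStep PySem.Dict.empty).getD cr.1 PySem.Dict.empty).getD
            (PySem.Str.lower (PySem.Str.strip cr.2)) 0 = 1 then p + 100 else p + 50) p
    = p + ((toKeys rs).map (W jug)).sum := by
  induction rs generalizing p with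
  | nil => simp [toKeys]
  | cons cr rs ih =>
    by_cases h : cr.2 = ""
    · simp [toKeys, h, ih]
    · simp only [List.foldl_cons, if_neg h]
      rw [ih]
      have hc := cLook_counts jug (cr.1, PySem.Str.lower (PySem.Str.strip cr.2))
      simp only [cLook] at hc
      rw [hc]
      simp only [toKeys, List.filter_cons]
      simp only [show (!(cr.2 == "")) = true by simp [h], if_true, List.map_cons, List.sum_cons]
      simp only [W, keyOf]
      by_cases hcnt : (allKeys jug).count (cr.1, PySem.Str.lower (PySem.Str.strip cr.2)) = 1
      · rw [if_pos (by exact_mod_cast hcnt), if_pos hcnt]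
        ring
      · rw [if_neg (by exact_mod_cast hcnt), if_neg hcnt]
        ring

-- A's whole result
lemma A_items (jug : List (String × List (String × List (String × String))))
    (hnd : (jug.map Prod.fst).Nodup) :
    calcular_puntos_ronda jug = jug.map (fun nd => (nd.1, ((toKeys (pvResp nd.2)).map (W jug)).sum)) := by
  simp only [calcular_puntos_ronda]
  rw [A_count]
  have hstep : (fun (punt : PySem.Dict String Int) (nd : String × List (String × List (String × String))) =>
      punt.insert nd.1 ((pvResp nd.2).foldl (fun p cr =>
        if cr.2 = "" then p
        else
          if (((allKeys jug).foldl ncStep PySem.Dict.empty).getD cr.1 PySem.Dict.empty).getD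
              (PySem.Str.lower (PySem.Str.strip cr.2)) 0 = 1 then p + 100 else p + 50) 0))
      = fun punt nd => punt.insert nd.1 (((toKeys (pvResp nd.2)).map (W jug)).sum) := by
    funext punt nd
    rw [A_score_inner]
    ring_nf
  rw [hstep, PySem.Dict.items_foldl_insert_fresh jug Prod.fst _ PySem.Dict.empty
    (fun a _ => PySem.Dict.contains_empty a.1) hnd]
  simp [PySem.Dict.empty]

-- B: index build is a modify-append fold over trOf
lemma B_index_inner (nm : String) (rs : List (String × String))
    (idx : PySem.Dict (String × String) (List String)) :
    rs.foldl (fun idx cr =>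
      if cr.2 ≠ "" then
        idx.modify (cr.1, PySem.Str.lower (PySem.Str.strip cr.2)) [] (· ++ [nm])
      else idx) idx
    = ((toKeys rs).map (fun k => (k, nm))).foldl (fun d p => d.modify p.1 [] (· ++ [p.2])) idx := by
  induction rs generalizing idx with
  | nil => rfl
  | cons cr rs ih =>
    by_cases h : cr.2 = ""
    · simp [toKeys, h]
      simp [toKeys] at ih
      exact ih idx
    · simp only [List.foldl_cons, if_pos (by simpa using h)]
      rw [ih]
      simp [toKeys, h, keyOf]

lemma B_index (jug : List (String × List (String × List (String × String))))
    (idx : PySem.Dict (String × String) (List String)) :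
    jug.foldl (fun idx nd =>
      (pvResp nd.2).foldl (fun idx cr =>
        if cr.2 ≠ "" then
          idx.modify (cr.1, PySem.Str.lower (PySem.Str.strip cr.2)) [] (· ++ [nd.1])
        else idx) idx) idx
    = (trOf jug).foldl (fun d p => d.modify p.1 [] (· ++ [p.2])) idx := by
  induction jug generalizing idx with
  | nil => rfl
  | cons nd jug ih =>
    simp only [trOf, List.flatMap_cons, List.foldl_cons, List.foldl_append]
    rw [B_index_inner, ih]
    rfl

-- B: scatter value lemma
lemma scat_getD (ps : List (String × Int)) (d : PySem.Dict String Int) (n : String) :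
    (scat d ps).getD n 0 = d.getD n 0 + sumFor n ps := by
  induction ps generalizing d with
  | nil => simp [scat, sumFor]
  | cons p ps ih =>
    simp only [scat, List.foldl_cons] at ih ⊢
    rw [ih, PySem.Dict.getD_modify]
    simp only [sumFor, List.filter_cons]
    by_cases h : p.1 = n
    · simp [h]
      ring
    · have hb : (p.1 == n) = false := beq_eq_false_iff_ne.2 h
      rw [if_neg (fun he => h he.symm)]
      simp [hb]

-- B: keys are preserved by a scatter
lemma scat_keys (ps : List (String × Int)) (d : PySem.Dict String Int)
    (h : ∀ p ∈ ps, p.1 ∈ d.keys) : (scat d ps).keys = d.keys := by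
  induction ps generalizing d with
  | nil => rfl
  | cons p ps ih =>
    simp only [scat, List.foldl_cons] at ih ⊢
    have hp : p.1 ∈ d.keys := h p (by simp)
    have hk : (d.modify p.1 0 (· + p.2)).keys = d.keys := by
      rw [PySem.Dict.keys_modify,
        PySem.Dict.keys_insert_of_contains _ _ ((PySem.Dict.contains_iff_mem_keys d p.1).2 hp)]
    rw [ih, hk]
    intro q hq
    rw [hk]
    exact h q (List.mem_cons_of_mem _ hq)

-- B: the per-group branch is a scatter of pairsOf
lemma scat_const (c : Int) (nombres : List String) (d : PySem.Dict String Int) :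
    nombres.foldl (fun d n => d.modify n 0 (· + c)) d
      = scat d (nombres.map (fun n => (n, c))) := by
  induction nombres generalizing d with
  | nil => rfl
  | cons a nombres ih => simp only [List.map_cons, scat, List.foldl_cons] at ih ⊢; rw [ih]

lemma group_scat (d : PySem.Dict String Int) (nombres : List String) :
    (if nombres.length = 1 then d.modify (nombres.headD "") 0 (· + 100)
     else nombres.foldl (fun d n => d.modify n 0 (· + 50)) d)
    = scat d (pairsOf nombres) := by
  by_cases h : nombres.length = 1
  · obtain ⟨a, rfl⟩ := List.length_eq_one_iff.1 h
    simp [pairsOf, wlen, scat]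
  · rw [if_neg h]
    rw [scat_const 50 nombres d]
    simp [pairsOf, wlen, h]

-- B: whole pass 2 is a scatter of the flattened groups
lemma scat_append (d : PySem.Dict String Int) (ps qs : List (String × Int)) :
    scat d (ps ++ qs) = scat (scat d ps) qs := List.foldl_append

lemma pass2_scat (vals : List (List String)) (d : PySem.Dict String Int) :
    vals.foldl (fun d nombres =>
      if nombres.length = 1 then d.modify (nombres.headD "") 0 (· + 100)
      else nombres.foldl (fun d n => d.modify n 0 (· + 50)) d) d
    = scat d (vals.flatMap pairsOf) := by
  induction vals generalizing d with
  | nil => rfl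
  | cons v vals ih =>
    simp only [List.foldl_cons, List.flatMap_cons, scat_append]
    rw [group_scat, ih]

-- sumFor arithmetic
lemma sumFor_append (n : String) (ps qs : List (String × Int)) :
    sumFor n (ps ++ qs) = sumFor n ps + sumFor n qs := by
  simp [sumFor, List.filter_append]

lemma sumFor_map_const (n : String) (c : Int) (v : List String) :
    sumFor n (v.map (fun m => (m, c))) = (v.count n : Int) * c := by
  induction v with
  | nil => simp [sumFor]
  | cons a v ih =>
    simp only [List.map_cons, sumFor, List.filter_cons, List.count_cons] at ih ⊢
    by_cases h : a = n
    · subst h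
      simp only [beq_self_eq_true, if_true, List.map_cons, List.sum_cons]
      rw [ih]
      push_cast
      ring
    · have hb : (a == n) = false := beq_eq_false_iff_ne.2 h
      simp only [hb, Bool.false_eq_true, if_false]
      rw [ih]
      simp

lemma sumFor_flatMap (n : String) (vals : List (List String)) :
    sumFor n (vals.flatMap pairsOf) = (vals.map (fun v => (v.count n : Int) * wlen v)).sum := by
  induction vals with
  | nil => simp [sumFor]
  | cons v vals ih =>
    simp only [List.flatMap_cons, sumFor_append, List.map_cons, List.sum_cons, ih, pairsOf]
    rw [sumFor_map_const]

-- the partition identity: summing per distinct key equals summing per score event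
lemma sum_map_ite_single (K : List (String × String)) (x : String × String) (c : Int)
    (hK : K.Nodup) (hx : x ∈ K) :
    (K.map (fun k => if k = x then c else 0)).sum = c := by
  induction K with
  | nil => cases hx
  | cons a K ih =>
    have hnd := List.nodup_cons.1 hK
    rcases List.mem_cons.1 hx with h | h
    · subst h
      simp only [List.map_cons, List.sum_cons, if_true]
      have hz : K.map (fun k => if k = x then c else 0) = K.map (fun _ => (0 : Int)) :=
        List.map_congr_left (fun k hk => if_neg (fun he => hnd.1 (by rw [← he]; exact hk)))
      rw [hz]
      simp
    · have ha : ¬ a = x := fun he => hnd.1 (he ▸ h)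
      simp only [List.map_cons, List.sum_cons, if_neg ha, ih hnd.2 h]
      ring

lemma partition_sum (f : (String × String) → Int) (n : String) :
    ∀ (tr : List ((String × String) × String)) (K : List (String × String)), K.Nodup →
      (∀ p ∈ tr, p.1 ∈ K) →
      (K.map (fun k => ((tr.countP (fun p => p.1 == k && p.2 == n)) : Int) * f k)).sum
        = ((tr.filter (fun p => p.2 == n)).map (fun p => f p.1)).sum := by
  intro tr
  induction tr with
  | nil => intro K hK hmem; simp
  | cons p tr ih =>
    intro K hK hmem
    have hmem' : ∀ q ∈ tr, q.1 ∈ K := fun q hq => hmem q (List.mem_cons_of_mem _ hq)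
    by_cases h2 : p.2 = n
    · have hstep : ∀ k ∈ K, (((p :: tr).countP (fun q => q.1 == k && q.2 == n)) : Int) * f k
          = ((tr.countP (fun q => q.1 == k && q.2 == n)) : Int) * f k
            + (if k = p.1 then f p.1 else 0) := by
        intro k _
        rw [List.countP_cons]
        by_cases h1 : p.1 = k
        · subst h1
          simp only [beq_self_eq_true, Bool.true_and, h2, if_true]
          push_cast
          ring
        · have hb : (p.1 == k && p.2 == n) = false := by simp [h1]
          rw [hb, show (if k = p.1 then f p.1 else 0) = 0 from if_neg (fun he => h1 he.symm)]
          simp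
      rw [List.map_congr_left hstep, PySem.List.sum_map_add_int, ih K hK hmem',
        sum_map_ite_single K p.1 (f p.1) hK (hmem p (by simp)),
        List.filter_cons, if_pos (by simpa using h2)]
      simp only [List.map_cons, List.sum_cons]
      ring
    · have hstep : ∀ k ∈ K, (((p :: tr).countP (fun q => q.1 == k && q.2 == n)) : Int) * f k
          = ((tr.countP (fun q => q.1 == k && q.2 == n)) : Int) * f k := by
        intro k _
        rw [List.countP_cons]
        have hb : (p.1 == k && p.2 == n) = false := by simp [h2]
        rw [hb]
        simp
      rw [List.map_congr_left hstep, ih K hK hmem', List.filter_cons,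
        if_neg (by simpa using h2)]

-- every score event names a player of the round
lemma mem_trOf_snd (jug : List (String × List (String × List (String × String))))
    (p : (String × String) × String) (hp : p ∈ trOf jug) : p.2 ∈ jug.map Prod.fst := by
  simp only [trOf, List.mem_flatMap, List.mem_map] at hp
  obtain ⟨nd, hnd, k, _, hk⟩ := hp
  exact List.mem_map.2 ⟨nd, hnd, by rw [← hk]⟩

-- a player's own score events
lemma filter_trOf (jug : List (String × List (String × List (String × String))))
    (hnd : (jug.map Prod.fst).Nodup) (nd : String × List (String × List (String × String)))
    (hm : nd ∈ jug) :
    (trOf jug).filter (fun p => p.2 == nd.1) = (toKeys (pvResp nd.2)).map (fun k => (k, nd.1)) := by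
  induction jug with
  | nil => cases hm
  | cons nd' jug ih =>
    have hnd0 : nd'.1 ∉ jug.map Prod.fst := (List.nodup_cons.1 (by simpa using hnd)).1
    have hnd1 : (jug.map Prod.fst).Nodup := (List.nodup_cons.1 (by simpa using hnd)).2
    simp only [trOf, List.flatMap_cons, List.filter_append]
    rcases List.mem_cons.1 hm with h | h
    · subst h
      have h1 : ((toKeys (pvResp nd.2)).map (fun k => (k, nd.1))).filter (fun p => p.2 == nd.1)
          = (toKeys (pvResp nd.2)).map (fun k => (k, nd.1)) := by
        rw [List.filter_map]
        simp [Function.comp_def]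
      have h2 : (trOf jug).filter (fun p => p.2 == nd.1) = [] := by
        apply List.filter_eq_nil_iff.2
        intro q hq
        simp only [beq_iff_eq]
        exact fun he => hnd0 (he ▸ mem_trOf_snd jug q hq)
      rw [h1]
      simp only [trOf] at h2
      rw [h2, List.append_nil]
    · have hne : nd'.1 ≠ nd.1 := by
        intro he
        exact hnd0 (he ▸ List.mem_map.2 ⟨nd, h, rfl⟩)
      have h1 : ((toKeys (pvResp nd'.2)).map (fun k => (k, nd'.1))).filter (fun p => p.2 == nd.1)
          = [] := by
        apply List.filter_eq_nil_iff.2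
        intro q hq
        obtain ⟨k, _, hk⟩ := List.mem_map.1 hq
        simp only [beq_iff_eq]
        rw [← hk]
        exact hne
      have h2 := ih hnd1 h
      simp only [trOf] at h2
      rw [h1, h2, List.nil_append]

-- B's whole result
lemma B_items (jug : List (String × List (String × List (String × String))))
    (hnd : (jug.map Prod.fst).Nodup) :
    calcular_puntos_ronda_alt jug = jug.map (fun nd => (nd.1, ((toKeys (pvResp nd.2)).map (W jug)).sum)) := by
  simp only [calcular_puntos_ronda_alt]
  rw [B_index, pass2_scat]
  -- puntajes0
  have h0items : (jug.foldl (fun d nd => d.insert nd.1 (0 : Int)) PySem.Dict.empty).items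
      = jug.map (fun nd => (nd.1, (0 : Int))) := by
    rw [PySem.Dict.items_foldl_insert_fresh jug Prod.fst _ PySem.Dict.empty
      (fun a _ => PySem.Dict.contains_empty a.1) hnd]
    simp [PySem.Dict.empty]
  set p0 := jug.foldl (fun d nd => d.insert nd.1 (0 : Int)) PySem.Dict.empty with hp0
  have h0keys : p0.keys = jug.map Prod.fst := by
    simp only [PySem.Dict.keys, h0items, List.map_map]
    exact List.map_congr_left (fun nd _ => rfl)
  have h0nodup : p0.keys.Nodup := by rw [h0keys]; exact hnd
  -- the index
  set tr := trOf jug with htr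
  set idx := tr.foldl (fun d p => d.modify p.1 [] (· ++ [p.2])) PySem.Dict.empty with hidx
  have hKnodup : idx.keys.Nodup := by
    rw [hidx]
    exact PySem.Dict.nodup_keys_foldl_modify_key tr Prod.fst [] (fun d p v => v ++ [p.2])
      PySem.Dict.empty (by simp [PySem.Dict.empty, PySem.Dict.keys])
  have hKeys : idx.keys = PySem.Set.ofList (tr.map Prod.fst) := by
    rw [hidx, PySem.Dict.keys_foldl_modify_key tr Prod.fst [] (fun d p v => v ++ [p.2])
      PySem.Dict.empty]
    rw [show PySem.Dict.empty.keys = ([] : List (String × String)) from rfl,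
      PySem.Set.update_nil_left]
  have hGet : ∀ k, idx.getD k [] = (tr.filter (fun p => p.1 == k)).map Prod.snd := by
    intro k
    rw [hidx, PySem.Dict.getD_foldl_modify_append tr PySem.Dict.empty k,
      PySem.Dict.getD_empty, List.nil_append]
  have hvals : idx.values = idx.keys.map (fun k => idx.getD k []) :=
    PySem.Dict.values_eq_map_keys idx hKnodup []
  -- the scattered pairs
  set bigP := idx.values.flatMap pairsOf with hbigP
  have hbmem : ∀ p ∈ bigP, p.1 ∈ p0.keys := by
    intro p hp
    obtain ⟨v, hv, hpv⟩ := List.mem_flatMap.1 hp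
    obtain ⟨nm, hnm, hpe⟩ := List.mem_map.1 hpv
    rw [hvals] at hv
    obtain ⟨k, _, hkv⟩ := List.mem_map.1 hv
    rw [← hkv, hGet] at hnm
    obtain ⟨q, hq, hq2⟩ := List.mem_map.1 hnm
    rw [h0keys, ← hpe]
    exact hq2 ▸ mem_trOf_snd jug q (List.mem_filter.1 hq).1
  have hfinkeys : (scat p0 bigP).keys = p0.keys := scat_keys bigP p0 hbmem
  -- read the result off
  rw [PySem.Dict.items_eq_map_keys (scat p0 bigP) (hfinkeys ▸ h0nodup) 0, hfinkeys, h0keys,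
    List.map_map]
  apply List.map_congr_left
  intro nd hm
  simp only [Function.comp_apply]
  have hv0 : p0.getD nd.1 0 = 0 :=
    PySem.Dict.getD_of_mem_items p0 (h0items ▸ List.mem_map.2 ⟨nd, hm, rfl⟩) h0nodup 0
  rw [scat_getD, hv0, zero_add, hbigP, sumFor_flatMap, hvals, List.map_map]
  have helt : ∀ k ∈ idx.keys,
      (((idx.getD k []).count nd.1 : Int) * wlen (idx.getD k []))
        = ((tr.countP (fun q => q.1 == k && q.2 == nd.1)) : Int) * W jug k := by
    intro k _
    rw [hGet]
    have hcnt : ((tr.filter (fun q => q.1 == k)).map Prod.snd).count nd.1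
        = tr.countP (fun q => q.1 == k && q.2 == nd.1) := by
      rw [List.count, List.countP_map, List.countP_filter]
      apply List.countP_congr
      intro a _
      simp [Bool.and_comm]
    have hacount : (allKeys jug).count k = (tr.filter (fun q => q.1 == k)).length := by
      rw [allKeys, ← htr, List.count, List.countP_map, List.countP_eq_length_filter]
      rfl
    have hlen : wlen ((tr.filter (fun q => q.1 == k)).map Prod.snd) = W jug k := by
      simp only [wlen, W, List.length_map, hacount]
    rw [hcnt, hlen]
  simp only [Function.comp_def]
  rw [List.map_congr_left helt,
    partition_sum (W jug) nd.1 tr idx.keys hKnodup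
      (fun p hp => by rw [hKeys]; exact (PySem.Set.mem_ofList _ _).2 (List.mem_map.2 ⟨p, hp, rfl⟩)),
    htr, filter_trOf jug hnd nd hm, List.map_map]
  rfl

-- ===== VERDICT (by name: the statement is the Claim_ definition above) =====
theorem calcular_puntos_ronda_spec : Claim_equal_calcular_puntos_ronda := by
  intro jug _ hpre
  unfold Spec_calcular_puntos_ronda
  rw [A_items jug hpre, B_items jug hpre]
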